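-- pv_equiv track=rewrite | github.com/k-harada/AtCoder | ARC/ARC163/C.py | solve_sub
-- ===== SOURCE A (Python) =====
-- def solve_sub(n):
--     for i in range(n):
--         if i * (i + 1) == n:
--             return [2] + [2 * p for p in solve_sub(n - 1)]
--     r = [n]
--     for i in range(1, n):
--         r.append(i * (i + 1))
--     return r
-- ===== SOURCE B (Python) =====
-- def solve_sub(n):
--     # Detect n == i*(i+1) by binary search for the least i >= 1 with i*(i+1) >= n,
--     # instead of A's linear scan; the recursion is then unrolled (n-1 is never
--     # oblong, since i*(i+1) is always even).
--     if n >= 2: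
--         lo, hi = 1, n
--         while lo < hi:
--             mid = (lo + hi) // 2
--             if mid * (mid + 1) < n:
--                 lo = mid + 1
--             else:
--                 hi = mid
--         if lo * (lo + 1) == n:
--             return [2, 2 * (n - 1)] + [2 * j * (j + 1) for j in range(1, n - 1)]
--     return [n] + [j * (j + 1) for j in range(1, n)]
-- ===== Notes on version B (the rewrite author's own statement) =====
-- stated objective: alternative
-- what changed: Replaces A's linear scan for an index whose oblong product equals n, and A's one-level recursion, by a binary search for the least positive index whose oblong product reaches n, with the recursive case unrolled into a direct list construction (the predecessor of an oblong number is never oblong, since oblong products are even).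
import Mathlib
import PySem

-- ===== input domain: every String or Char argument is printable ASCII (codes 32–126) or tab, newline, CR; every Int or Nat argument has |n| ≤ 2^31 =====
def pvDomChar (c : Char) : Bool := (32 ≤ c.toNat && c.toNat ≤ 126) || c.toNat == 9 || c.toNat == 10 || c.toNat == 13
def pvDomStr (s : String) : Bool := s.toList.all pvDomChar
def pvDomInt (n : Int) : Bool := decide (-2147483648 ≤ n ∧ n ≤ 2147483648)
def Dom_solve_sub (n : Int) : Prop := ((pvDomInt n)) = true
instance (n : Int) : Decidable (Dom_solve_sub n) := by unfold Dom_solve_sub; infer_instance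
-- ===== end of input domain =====

-- B replaces A's linear oblong scan and one-level recursion by a binary search
-- for the least i ≥ 1 with i*(i+1) ≥ n and an unrolled recursive case (alternative decomposition).

-- ===== PORT A =====
def solve_sub (n : Int) : List Int :=
  match h : (PySem.List.pyRange 0 n 1).find? (fun i => i * (i + 1) == n) with
  | some _ => 2 :: (solve_sub (n - 1)).map (fun p => 2 * p)
  | none => n :: (PySem.List.pyRange 1 n 1).map (fun i => i * (i + 1))
termination_by n.toNat
decreasing_by
  have hm := List.mem_of_find?_eq_some h
  rw [PySem.List.mem_pyRange_one] at hm
  omega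

-- ===== PORT B =====
def bsearchAlt (n lo hi : Int) : Int :=
  if _h : lo < hi then
    let mid := PySem.Int.floordiv (lo + hi) 2
    if mid * (mid + 1) < n then bsearchAlt n (mid + 1) hi else bsearchAlt n lo mid
  else lo
termination_by (hi - lo).toNat
decreasing_by
  · have h1 : lo ≤ PySem.Int.floordiv (lo + hi) 2 := by
      rw [PySem.Int.le_floordiv_iff_mul_le (by omega)]; omega
    omega
  · have h2 : PySem.Int.floordiv (lo + hi) 2 < hi := by
      rw [PySem.Int.floordiv_lt_iff_lt_mul (by omega)]; omega
    omega

def solve_sub_alt (n : Int) : List Int :=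
  if n ≥ 2 then
    let lo := bsearchAlt n 1 n
    if lo * (lo + 1) = n then
      [2, 2 * (n - 1)] ++ (PySem.List.pyRange 1 (n - 1) 1).map (fun j => 2 * j * (j + 1))
    else n :: (PySem.List.pyRange 1 n 1).map (fun j => j * (j + 1))
  else n :: (PySem.List.pyRange 1 n 1).map (fun j => j * (j + 1))

-- ===== PRECONDITION & SPEC =====
def Spec_solve_sub (n : Int) (out : List Int) : Prop := out = solve_sub_alt n
instance (n : Int) (out : List Int) : Decidable (Spec_solve_sub n out) := by unfold Spec_solve_sub; infer_instance

-- ===== CLAIM (what is proved, stated in full; the proofs are below) =====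
def Claim_equal_solve_sub : Prop := ∀ (n : Int), Dom_solve_sub n → Spec_solve_sub n (solve_sub n)

-- ===== LEMMAS AND PROOFS =====

-- n is "oblong and detected by A's loop": some i in range(n) with i*(i+1) = n
def Oblong (n : Int) : Prop := ∃ i : Int, 0 ≤ i ∧ i < n ∧ i * (i + 1) = n

theorem find?_eq_none_of_not_oblong {n : Int} (h : ¬ Oblong n) :
    (PySem.List.pyRange 0 n 1).find? (fun i => i * (i + 1) == n) = none := by
  rw [List.find?_eq_none]
  intro i hi
  rw [PySem.List.mem_pyRange_one] at hi
  simp only [beq_iff_eq]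
  intro he
  exact h ⟨i, hi.1, hi.2, he⟩

theorem oblong_n_ge_two {n : Int} (h : Oblong n) : 2 ≤ n := by
  obtain ⟨i, h0, hlt, he⟩ := h
  nlinarith

theorem oblong_even {n : Int} (h : Oblong n) : Even n := by
  obtain ⟨i, _, _, he⟩ := h
  exact he ▸ Int.even_mul_succ_self i

-- binary-search invariant: result is the least i ≥ 1 with n ≤ i*(i+1)
theorem bsearchAlt_spec (n lo hi : Int) :
    1 ≤ lo → lo ≤ hi → n ≤ hi * (hi + 1) → (∀ j, 1 ≤ j → j < lo → j * (j + 1) < n) →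
    1 ≤ bsearchAlt n lo hi ∧ bsearchAlt n lo hi ≤ hi ∧ n ≤ bsearchAlt n lo hi * (bsearchAlt n lo hi + 1) ∧
      ∀ j, 1 ≤ j → j < bsearchAlt n lo hi → j * (j + 1) < n := by
  induction lo, hi using bsearchAlt.induct n with
  | case1 lo hi h mid hlt ih =>
    intro h1 h2 h3 h4
    rw [bsearchAlt, dif_pos h, if_pos hlt]
    have hmid : lo ≤ PySem.Int.floordiv (lo + hi) 2 ∧ PySem.Int.floordiv (lo + hi) 2 < hi :=
      ⟨by rw [PySem.Int.le_floordiv_iff_mul_le (by omega)]; omega,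
       by rw [PySem.Int.floordiv_lt_iff_lt_mul (by omega)]; omega⟩
    refine ih (by omega) (by omega) h3 ?_
    intro j hj1 hj2
    set m := PySem.Int.floordiv (lo + hi) 2 with hm
    rcases lt_or_ge j lo with hc | hc
    · exact h4 j hj1 hc
    · -- lo ≤ j ≤ m, monotone: j*(j+1) ≤ m*(m+1) < n
      nlinarith [hmid.1, hmid.2]
  | case2 lo hi h mid hlt ih =>
    intro h1 h2 h3 h4
    rw [bsearchAlt, dif_pos h, if_neg hlt]
    have hmid : lo ≤ PySem.Int.floordiv (lo + hi) 2 ∧ PySem.Int.floordiv (lo + hi) 2 < hi :=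
      ⟨by rw [PySem.Int.le_floordiv_iff_mul_le (by omega)]; omega,
       by rw [PySem.Int.floordiv_lt_iff_lt_mul (by omega)]; omega⟩
    have hmm : mid = PySem.Int.floordiv (lo + hi) 2 := rfl
    rw [← hmm]
    obtain ⟨a1, a2, a3, a4⟩ := ih h1 (hmm ▸ hmid.1) (by omega) h4
    exact ⟨a1, by omega, a3, a4⟩
  | case3 lo hi h =>
    intro h1 h2 h3 h4
    rw [bsearchAlt, dif_neg h]
    refine ⟨h1, h2, ?_, h4⟩
    have hlh : lo = hi := by omega
    rw [hlh]; exact h3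


theorem bsearch_char {n : Int} (hn : 2 ≤ n) :
    bsearchAlt n 1 n * (bsearchAlt n 1 n + 1) = n ↔ Oblong n := by
  obtain ⟨a1, a2, a3, a4⟩ := bsearchAlt_spec n 1 n le_rfl (by omega)
    (by nlinarith) (by omega)
  set r := bsearchAlt n 1 n with hr
  constructor
  · intro he
    exact ⟨r, by omega, by nlinarith, he⟩
  · rintro ⟨i, h0, hlt, he⟩
    have hi1 : 1 ≤ i := by
      rcases eq_or_lt_of_le h0 with hz | hz
      · exfalso
        rw [← hz] at he
        norm_num at he
        omega
      · omega
    rcases lt_trichotomy i r with hc | hc | hc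
    · have := a4 i hi1 hc; omega
    · rw [← hc]; exact he
    · nlinarith

theorem not_oblong_pred {n : Int} (h : Oblong n) : ¬ Oblong (n - 1) := by
  intro h'
  have h1 := oblong_even h
  have h2 := oblong_even h'
  obtain ⟨a, ha⟩ := h1
  obtain ⟨b, hb⟩ := h2
  omega

theorem solve_sub_of_not_oblong {n : Int} (h : ¬ Oblong n) :
    solve_sub n = n :: (PySem.List.pyRange 1 n 1).map (fun i => i * (i + 1)) := by
  rw [solve_sub]
  rw [find?_eq_none_of_not_oblong h]

-- ===== VERDICT (by name: the statement is the Claim_ definition above) =====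
theorem solve_sub_spec : Claim_equal_solve_sub := by
  intro n _ 
  unfold Spec_solve_sub
  by_cases hob : Oblong n
  · have hn := oblong_n_ge_two hob
    -- A side
    obtain ⟨i, h0, hlt, he⟩ := hob
    have hs : (PySem.List.pyRange 0 n 1).find? (fun i => i * (i + 1) == n) ≠ none := by
      intro hnone
      rw [List.find?_eq_none] at hnone
      exact (by simpa using hnone i (by rw [PySem.List.mem_pyRange_one]; omega) : ¬ i * (i+1) = n) he
    rw [solve_sub]
    rcases hfind : (PySem.List.pyRange 0 n 1).find? (fun i => i * (i + 1) == n) with _ | j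
    · exact absurd hfind hs
    · have hpred := not_oblong_pred ⟨i, h0, hlt, he⟩
      rw [solve_sub_of_not_oblong hpred]
      unfold solve_sub_alt
      rw [if_pos hn]
      simp only
      rw [if_pos ((bsearch_char hn).mpr ⟨i, h0, hlt, he⟩)]
      simp only [List.map_cons, List.map_map, List.cons_append, List.nil_append]
      congr 2
      exact List.map_congr_left fun j _ => by simp only [Function.comp_apply]; ring
  · rw [solve_sub_of_not_oblong hob]
    unfold solve_sub_alt
    by_cases hn : n ≥ 2
    · rw [if_pos hn]
      simp only
      rw [if_neg (fun hc => hob ((bsearch_char hn).mp hc))]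
    · rw [if_neg hn]
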